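-- pv_equiv track=rewrite | github.com/doorcountydrone/MarksMetarMaps | wifi_manager.py | _http_header_value
-- ===== SOURCE A (Python) =====
-- def _http_header_value(request, header_name):
--     """Return first header value (case-insensitive header name), or ''."""
--     try:
--         prefix = (header_name.strip() + ':').lower()
--         for line in request.split('\r\n'):
--             if line and line.lower().startswith(prefix):
--                 return line.split(':', 1)[1].strip()
--     except Exception:
--         pass
--     return ''
-- ===== SOURCE B (Python) =====
-- def _http_header_value(request, header_name):
--     """Return first header value (case-insensitive header name), or ''."""
--     try:
--         table = {}
--         for line in request.split('\r\n'):
--             if ':' in line: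
--                 raw, rest = line.split(':', 1)
--                 key = raw.lower()
--                 if key not in table:
--                     table[key] = rest.strip()
--         return table.get(header_name.strip().lower(), '')
--     except Exception:
--         return ''
-- ===== Notes on version B (the rewrite author's own statement) =====
-- stated objective: idiomatic
-- what changed: Replaces the scan-with-early-return over lines by a single pass that builds a first-occurrence dict keyed by the lowercased pre-colon text, followed by one dict lookup.
-- outside the precondition, e.g. on _http_header_value('a:b: v', 'a:b'): A returns 'b: v', B returns ''
import Mathlib
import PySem

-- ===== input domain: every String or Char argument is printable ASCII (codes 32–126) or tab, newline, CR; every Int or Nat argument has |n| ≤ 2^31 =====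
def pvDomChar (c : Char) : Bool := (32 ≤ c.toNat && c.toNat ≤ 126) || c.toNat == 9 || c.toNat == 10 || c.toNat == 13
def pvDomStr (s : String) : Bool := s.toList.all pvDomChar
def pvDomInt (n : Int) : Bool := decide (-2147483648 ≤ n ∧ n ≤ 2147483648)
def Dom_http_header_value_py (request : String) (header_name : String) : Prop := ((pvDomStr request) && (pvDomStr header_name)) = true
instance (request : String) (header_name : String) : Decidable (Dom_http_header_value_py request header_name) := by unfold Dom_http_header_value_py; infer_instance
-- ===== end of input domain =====

-- B replaces A's scan-with-early-return by a build-an-index-then-lookup pass (idiomatic, same cost);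
-- Pre_ excludes header names whose stripped text contains ':', where A's prefix match is an accident no lookup reproduces.


-- ===== PORT A =====
-- the 'for line in …: if line and line.lower().startswith(prefix): return …' loop of A
def pvALoop (pre : String) : List String → String
  | [] => ""
  | line :: rest =>
    if line ≠ "" ∧ PySem.Str.startswith (PySem.Str.lower line) pre = true then
      match PySem.Str.splitMax? line ":" 1 with
      | some parts =>
        match PySem.List.pyGet? parts 1 with
        | some v => PySem.Str.strip v
        | none => ""            -- IndexError, caught by the surrounding 'except' → ''
      | none => ""              -- unreachable (sep ≠ ''); 'except' → ''
    else pvALoop pre rest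

def http_header_value_py (request : String) (header_name : String) : String :=
  let pre := PySem.Str.lower (PySem.Str.strip header_name ++ ":")
  match PySem.Str.split? request "\r\n" with
  | some lines => pvALoop pre lines
  | none => ""                  -- unreachable (sep ≠ ''); 'except' → ''

-- ===== PORT B =====
-- one iteration of B's dict-building loop: keep the FIRST occurrence of each lowercased pre-colon key
def pvBStep (t : PySem.Dict String String) (line : String) : PySem.Dict String String :=
  if PySem.Str.isIn ":" line = true then
    match PySem.Str.splitMax? line ":" 1 with
    | some (raw :: rest :: _) =>
      let key := PySem.Str.lower raw
      if t.contains key = true then t else t.insert key (PySem.Str.strip rest)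
    | _ => t                    -- unreachable: ':' in line gives exactly two pieces
  else t

def http_header_value_py_alt (request : String) (header_name : String) : String :=
  match PySem.Str.split? request "\r\n" with
  | some lines =>
    let table := lines.foldl pvBStep PySem.Dict.empty
    table.getD (PySem.Str.lower (PySem.Str.strip header_name)) ""
  | none => ""                  -- unreachable (sep ≠ ''); 'except' → ''

-- ===== PRECONDITION & SPEC =====
-- Pre_ excludes header names whose stripped text contains ':' (not a header name): there A's
-- startswith-prefix match can fire across two colons yet still return the tail after the FIRST
-- colon, while B's name-indexed lookup finds nothing — both values are defensible on such input.
def Pre_http_header_value_py (request : String) (header_name : String) : Prop :=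
  PySem.Str.isIn ":" (PySem.Str.strip header_name) = false
instance (request : String) (header_name : String) : Decidable (Pre_http_header_value_py request header_name) := by unfold Pre_http_header_value_py; infer_instance

def pvWitness_http_header_value_py : String × String :=
  ("GET / HTTP/1.1\r\nHost: example.com\r\nAccept: */*", "host")

def Spec_http_header_value_py (request : String) (header_name : String) (out : String) : Prop := out = http_header_value_py_alt request header_name
instance (request : String) (header_name : String) (out : String) : Decidable (Spec_http_header_value_py request header_name out) := by unfold Spec_http_header_value_py; infer_instance

-- ===== CLAIM (what is proved, stated in full; the proofs are below) =====
def Claim_equal_http_header_value_py : Prop := ∀ (request : String) (header_name : String), Dom_http_header_value_py request header_name → Pre_http_header_value_py request header_name → Spec_http_header_value_py request header_name (http_header_value_py request header_name)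

-- ===== LEMMAS AND PROOFS =====

lemma pv_toNat_le {a b : Char} (h : a ≤ b) : a.toNat ≤ b.toNat := h

lemma pv_lowerChar_eq_colon (c : Char) : PySem.Chars.lowerChar c = ':' ↔ c = ':' := by
  unfold PySem.Chars.lowerChar PySem.Chars.isupper
  have h58 : (':' : Char).toNat = 58 := rfl
  split_ifs with h
  · simp only [Bool.and_eq_true, decide_eq_true_eq] at h
    have h1 := pv_toNat_le h.1
    have h2 := pv_toNat_le h.2
    have hA : ('A' : Char).toNat = 65 := rfl
    have hZ : ('Z' : Char).toNat = 90 := rfl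
    constructor
    · intro he
      exfalso
      have h3 : (Char.ofNat (c.toNat + 32)).toNat = (':' : Char).toNat := by rw [he]
      rw [Char.toNat_ofNat] at h3
      have hv : (c.toNat + 32).isValidChar := Or.inl (by omega)
      rw [if_pos hv] at h3
      omega
    · intro he; rw [he] at h1 h2; omega
  · simp

lemma pv_mem_lower (l : List Char) : ':' ∈ PySem.Chars.lower l ↔ ':' ∈ l := by
  simp only [PySem.Chars.lower, List.mem_map]
  constructor
  · rintro ⟨c, hc, he⟩; rwa [(pv_lowerChar_eq_colon c).mp he] at hc
  · intro h; exact ⟨':', h, rfl⟩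

lemma pv_take_lower (l : List Char) :
    (PySem.Chars.lower l).takeWhile (fun c => c ≠ ':') = PySem.Chars.lower (l.takeWhile (fun c => c ≠ ':')) := by
  simp only [PySem.Chars.lower, List.takeWhile_map]
  have hp : ((fun c => decide (c ≠ ':')) ∘ PySem.Chars.lowerChar) = (fun c : Char => decide (c ≠ ':')) := by
    funext c; simp [pv_lowerChar_eq_colon]
  rw [hp]

lemma pv_go_zero (fuel : Nat) (l cur : List Char) (acc : List (List Char)) :
    PySem.Chars.splitOnMax.go [':'] fuel 0 l cur acc = ((cur.reverse ++ l) :: acc).reverse := by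
  cases fuel with
  | zero => rfl
  | succ n => cases l with
    | nil => simp [PySem.Chars.splitOnMax.go]
    | cons c rest => simp [PySem.Chars.splitOnMax.go]

lemma pv_go_one (fuel : Nat) (l cur : List Char) (acc : List (List Char)) (h : l.length < fuel) :
    PySem.Chars.splitOnMax.go [':'] fuel 1 l cur acc =
      if ':' ∈ l then
        acc.reverse ++ [cur.reverse ++ l.takeWhile (fun c => c ≠ ':'), (l.dropWhile (fun c => c ≠ ':')).tail]
      else acc.reverse ++ [cur.reverse ++ l] := by
  induction fuel generalizing l cur acc with
  | zero => omega
  | succ n ih =>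
    cases l with
    | nil => simp [PySem.Chars.splitOnMax.go]
    | cons c rest =>
      by_cases hc : c = ':'
      · subst hc
        have : PySem.Chars.splitOnMax.go [':'] (n+1) 1 (':' :: rest) cur acc
            = PySem.Chars.splitOnMax.go [':'] n 0 rest [] (cur.reverse :: acc) := by
          simp [PySem.Chars.splitOnMax.go, List.isPrefixOf]
        rw [this, pv_go_zero]
        simp
      · have : PySem.Chars.splitOnMax.go [':'] (n+1) 1 (c :: rest) cur acc
            = PySem.Chars.splitOnMax.go [':'] n 1 rest (c :: cur) acc := by
          simp [PySem.Chars.splitOnMax.go, List.isPrefixOf]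
          intro he; exact absurd he.symm hc
        rw [this, ih rest (c :: cur) acc (by simpa using Nat.lt_of_succ_lt_succ h)]
        simp [hc, Ne.symm hc]

lemma pv_split_one (l : List Char) :
    PySem.Chars.splitOnMax l [':'] 1 =
      if ':' ∈ l then [l.takeWhile (fun c => c ≠ ':'), (l.dropWhile (fun c => c ≠ ':')).tail]
      else [l] := by
  have h1 : ¬ ((1 : Int) < 0) := by norm_num
  rw [PySem.Chars.splitOnMax, if_neg h1]
  show PySem.Chars.splitOnMax.go [':'] (l.length + 1) 1 l [] [] = _
  rw [pv_go_one (l.length + 1) l [] [] (by omega)]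
  split <;> simp

lemma pv_prefix_iff (key L : List Char) (hk : ':' ∉ key) :
    (key ++ [':']) <+: L ↔ ':' ∈ L ∧ L.takeWhile (fun c => c ≠ ':') = key := by
  induction key generalizing L with
  | nil =>
    cases L with
    | nil => simp
    | cons c t =>
      constructor
      · rintro h
        rcases (List.cons_prefix_cons.mp h) with ⟨he, -⟩
        subst he
        simp
      · rintro ⟨-, ht⟩
        have : ¬ (c ≠ ':') := by
          intro hc
          simp [hc] at ht
        rw [not_not] at this
        subst this
        simp
  | cons k ks ih =>
    cases L with
    | nil => simp
    | cons c t =>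
      have hkc : k ≠ ':' := fun h => hk (h ▸ List.mem_cons_self)
      have hks : ':' ∉ ks := fun h => hk (List.mem_cons_of_mem _ h)
      constructor
      · rintro h
        rcases (List.cons_prefix_cons.mp h) with ⟨he, htl⟩
        subst he
        rcases (ih t hks).mp htl with ⟨hm, ht⟩
        refine ⟨List.mem_cons_of_mem _ hm, ?_⟩
        rw [List.takeWhile_cons_of_pos (by simpa using hkc), ht]
      · rintro ⟨hm, ht⟩
        by_cases hc : c = ':'
        · subst hc
          rw [List.takeWhile_cons_of_neg (by simp)] at ht
          exact absurd ht.symm (by simp)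
        · rw [List.takeWhile_cons_of_pos (by simpa using hc)] at ht
          have he : c = k := by
            have := congrArg (fun l => l.head?) ht
            simpa using this
          subst he
          have ht' : List.takeWhile (fun c => decide (c ≠ ':')) t = ks := by
            have := congrArg (fun l => l.tail) ht
            simpa using this
          refine List.cons_prefix_cons.mpr ⟨rfl, (ih t hks).mpr ⟨?_, ht'⟩⟩
          rcases List.mem_cons.mp hm with hm1 | hm1
          · exact absurd hm1.symm hc
          · exact hm1

lemma pv_guard_iff (keyS pre line : String) (hk : ':' ∉ keyS.toList)
    (hpre : pre.toList = keyS.toList ++ [':']) :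
    (line ≠ "" ∧ PySem.Str.startswith (PySem.Str.lower line) pre = true) ↔
      (':' ∈ line.toList ∧
        PySem.Str.lower (String.ofList (line.toList.takeWhile (fun c => c ≠ ':'))) = keyS) := by
  have hsw : PySem.Str.startswith (PySem.Str.lower line) pre = true ↔
      (keyS.toList ++ [':']) <+: PySem.Chars.lower line.toList := by
    rw [PySem.Str.startswith_eq, PySem.Str.toList_lower, hpre, PySem.Chars.startswith]
    exact List.isPrefixOf_iff_prefix
  rw [hsw, pv_prefix_iff _ _ hk, pv_mem_lower, pv_take_lower]
  have h2 : PySem.Chars.lower (line.toList.takeWhile (fun c => c ≠ ':')) =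
      (PySem.Str.lower (String.ofList (line.toList.takeWhile (fun c => c ≠ ':')))).toList := by
    rw [PySem.Str.toList_lower, String.toList_ofList]
  rw [h2, String.toList_inj]
  constructor
  · rintro ⟨-, h⟩; exact h
  · rintro ⟨hm, h⟩
    refine ⟨?_, hm, h⟩
    intro he; subst he; simp at hm

lemma pv_isIn_true (line : String) (h : ':' ∈ line.toList) : PySem.Str.isIn ":" line = true := by
  rw [PySem.Str.isIn_eq]
  have h2 : (":" : String).toList = [':'] := rfl
  rw [h2]
  cases hb : PySem.Chars.isIn [':'] line.toList
  · exact absurd ((List.singleton_infix_iff ':' line.toList).mpr h)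
      ((PySem.Chars.isIn_eq_false_iff _ _).mp hb)
  · rfl

lemma pv_isIn_false (line : String) (h : ':' ∉ line.toList) : PySem.Str.isIn ":" line = false := by
  rw [PySem.Str.isIn_eq]
  have h2 : (":" : String).toList = [':'] := rfl
  rw [h2]
  exact (PySem.Chars.isIn_eq_false_iff _ _).mpr
    (fun hinf => h ((List.singleton_infix_iff ':' line.toList).mp hinf))

lemma pv_split_line (line : String) (hcol : ':' ∈ line.toList) :
    PySem.Str.splitMax? line ":" 1 =
      some [String.ofList (line.toList.takeWhile (fun c => c ≠ ':')),
            String.ofList ((line.toList.dropWhile (fun c => c ≠ ':')).tail)] := by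
  rw [PySem.Str.splitMax?]
  have h2 : (":" : String).toList = [':'] := rfl
  rw [h2, PySem.Chars.splitMax?]
  rw [if_neg (by simp)]
  rw [pv_split_one, if_pos hcol]
  rfl

lemma pvBStep_no_colon (t : PySem.Dict String String) (line : String) (h : ':' ∉ line.toList) :
    pvBStep t line = t := by
  rw [pvBStep, if_neg (by rw [pv_isIn_false line h]; simp)]

lemma pvBStep_colon (t : PySem.Dict String String) (line : String) (hcol : ':' ∈ line.toList) :
    pvBStep t line =
      if t.contains (PySem.Str.lower (String.ofList (line.toList.takeWhile (fun c => c ≠ ':')))) = true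
      then t
      else t.insert (PySem.Str.lower (String.ofList (line.toList.takeWhile (fun c => c ≠ ':'))))
             (PySem.Str.strip (String.ofList ((line.toList.dropWhile (fun c => c ≠ ':')).tail))) := by
  rw [pvBStep, if_pos (pv_isIn_true line hcol), pv_split_line line hcol]

lemma pvALoop_cons_colon (pre line : String) (rest : List String) (hcol : ':' ∈ line.toList) :
    pvALoop pre (line :: rest) =
      if line ≠ "" ∧ PySem.Str.startswith (PySem.Str.lower line) pre = true
      then PySem.Str.strip (String.ofList ((line.toList.dropWhile (fun c => c ≠ ':')).tail))
      else pvALoop pre rest := by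
  rw [pvALoop]
  split
  · rw [pv_split_line line hcol]
    simp [PySem.List.pyGet?, PySem.List.pyIdx?]
  · rfl

lemma pv_loop_inv (keyS pre : String) (hk : ':' ∉ keyS.toList)
    (hpre : pre.toList = keyS.toList ++ [':']) :
    ∀ (lines : List String) (t : PySem.Dict String String),
      (lines.foldl pvBStep t).getD keyS "" =
        if t.contains keyS = true then t.getD keyS "" else pvALoop pre lines := by
  intro lines
  induction lines with
  | nil =>
    intro t
    rw [List.foldl_nil, pvALoop]
    split
    · rfl
    · next h => exact PySem.Dict.getD_of_not_contains t "" (Bool.not_eq_true _ ▸ h)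
  | cons line rest ih =>
    intro t
    rw [List.foldl_cons]
    by_cases hcol : ':' ∈ line.toList
    · rw [pvBStep_colon t line hcol, pvALoop_cons_colon pre line rest hcol]
      by_cases hkey :
          PySem.Str.lower (String.ofList (line.toList.takeWhile (fun c => c ≠ ':'))) = keyS
      · rw [hkey, if_pos ((pv_guard_iff keyS pre line hk hpre).mpr ⟨hcol, hkey⟩)]
        by_cases hct : t.contains keyS = true
        · rw [if_pos hct, ih t, if_pos hct, if_pos hct]
        · rw [if_neg hct, ih _, if_neg hct, PySem.Dict.contains_insert_self, if_pos rfl,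
            PySem.Dict.getD_insert_self]
      · have hga : ¬ (line ≠ "" ∧ PySem.Str.startswith (PySem.Str.lower line) pre = true) :=
          fun hg => hkey ((pv_guard_iff keyS pre line hk hpre).mp hg).2
        rw [if_neg hga]
        by_cases hct :
            t.contains (PySem.Str.lower (String.ofList (line.toList.takeWhile (fun c => c ≠ ':')))) = true
        · rw [if_pos hct, ih t]
        · have hne : keyS ≠ PySem.Str.lower (String.ofList (line.toList.takeWhile (fun c => c ≠ ':'))) :=
            Ne.symm hkey
          rw [if_neg hct, ih _, PySem.Dict.contains_insert, PySem.Dict.getD_insert_of_ne t _ _ hne]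
          have hbe : (keyS == PySem.Str.lower (String.ofList (line.toList.takeWhile (fun c => c ≠ ':')))) = false := by
            simpa using hne
          rw [hbe, Bool.false_or]
    · have hga : ¬ (line ≠ "" ∧ PySem.Str.startswith (PySem.Str.lower line) pre = true) :=
        fun hg => hcol ((pv_guard_iff keyS pre line hk hpre).mp hg).1
      have hskip : pvALoop pre (line :: rest) = pvALoop pre rest := by
        rw [pvALoop, if_neg hga]
      rw [pvBStep_no_colon t line hcol, ih t, hskip]

-- ===== VERDICT (by name: the statement is the Claim_ definition above) =====
theorem http_header_value_py_spec : Claim_equal_http_header_value_py := by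
  intro request header_name _ hp
  unfold Spec_http_header_value_py http_header_value_py http_header_value_py_alt
  unfold Pre_http_header_value_py at hp
  have hk : ':' ∉ (PySem.Str.lower (PySem.Str.strip header_name)).toList := by
    rw [PySem.Str.toList_lower, pv_mem_lower]
    rw [PySem.Str.isIn_eq] at hp
    have h2 : (":" : String).toList = [':'] := rfl
    rw [h2] at hp
    exact fun hm => ((PySem.Chars.isIn_eq_false_iff _ _).mp hp)
      ((List.singleton_infix_iff _ _).mpr hm)
  have hpre : (PySem.Str.lower (PySem.Str.strip header_name ++ ":")).toList
      = (PySem.Str.lower (PySem.Str.strip header_name)).toList ++ [':'] := by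
    rw [PySem.Str.toList_lower, PySem.Str.toList_lower, String.toList_append]
    have h2 : (":" : String).toList = [':'] := rfl
    rw [h2, PySem.Chars.lower, PySem.Chars.lower, List.map_append]
    rfl
  cases hsp : PySem.Str.split? request "\r\n" with
  | none => rfl
  | some lines =>
    have h := pv_loop_inv (PySem.Str.lower (PySem.Str.strip header_name))
      (PySem.Str.lower (PySem.Str.strip header_name ++ ":")) hk hpre lines PySem.Dict.empty
    rw [PySem.Dict.contains_empty, if_neg (by simp)] at h
    exact h.symm
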